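-- pv_equiv track=rewrite | github.com/puspak2n/Narra | agentic_ai.py | _generate_specific_fallback_next_steps
-- ===== SOURCE A (Python) =====
-- def _generate_specific_fallback_next_steps(df, analysis, charts, findings):
--     """Generate specific next steps without AI"""
--     steps = []
--
--     # Based on actual findings
--     for i, finding in enumerate(findings[:3]):
--         if 'missing data' in finding.lower():
--             steps.append({
--                 "action": f"Address data quality issues - {finding}. Implement data validation rules.",
--                 "timeline": "Within 1 week",
--                 "owner": "Data Engineering Team",
--                 "impact": "Improve analysis accuracy by reducing null values",
--                 "priority": "high"
--             })
--         elif 'correlation' in finding.lower():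
--             steps.append({
--                 "action": f"Investigate correlation finding: {finding}. Build predictive model if correlation is causal.",
--                 "timeline": "Within 2 weeks",
--                 "owner": "Analytics Team",
--                 "impact": "Enable predictive analytics for business planning",
--                 "priority": "medium"
--             })
--         elif 'dominated by' in finding.lower() or '%' in finding:
--             steps.append({
--                 "action": f"Analyze concentration risk: {finding}. Develop diversification strategy.",
--                 "timeline": "This month",
--                 "owner": "Strategy Team",
--                 "impact": "Reduce business risk through diversification",
--                 "priority": "high"
--             })
--
--     # Always include data monitoring step
--     steps.append({
--         "action": f"Set up automated monitoring for {len(findings)} key metrics identified in analysis",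
--         "timeline": "Within 1 week",
--         "owner": "BI Team",
--         "impact": "Enable proactive decision making with real-time alerts",
--         "priority": "medium"
--     })
--
--     return steps[:5]
-- ===== SOURCE B (Python) =====
-- def _classify(finding):
--     """Category of a finding: 0 missing-data, 1 correlation, 2 concentration, None otherwise."""
--     lowered = finding.lower()
--     if 'missing data' in lowered:
--         return 0
--     if 'correlation' in lowered:
--         return 1
--     if 'dominated by' in lowered or '%' in finding:
--         return 2
--     return None
--
--
-- def _make_step(category, finding):
--     if category == 0:
--         return {
--             "action": f"Address data quality issues - {finding}. Implement data validation rules.",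
--             "timeline": "Within 1 week",
--             "owner": "Data Engineering Team",
--             "impact": "Improve analysis accuracy by reducing null values",
--             "priority": "high",
--         }
--     if category == 1:
--         return {
--             "action": f"Investigate correlation finding: {finding}. Build predictive model if correlation is causal.",
--             "timeline": "Within 2 weeks",
--             "owner": "Analytics Team",
--             "impact": "Enable predictive analytics for business planning",
--             "priority": "medium",
--         }
--     return {
--         "action": f"Analyze concentration risk: {finding}. Develop diversification strategy.",
--         "timeline": "This month",
--         "owner": "Strategy Team",
--         "impact": "Reduce business risk through diversification",
--         "priority": "high",
--     }
--
--
-- def _generate_specific_fallback_next_steps(df, analysis, charts, findings):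
--     """Recursive back-to-front build: base case is the monitoring step; each level
--     conses the current finding's step (if it classifies) in front of the rest.
--     At most 3 classified steps + 1 monitoring step exist, so no [:5] truncation is needed."""
--     n = len(findings)
--
--     def go(budget, fs):
--         if budget == 0 or not fs:
--             return [{
--                 "action": f"Set up automated monitoring for {n} key metrics identified in analysis",
--                 "timeline": "Within 1 week",
--                 "owner": "BI Team",
--                 "impact": "Enable proactive decision making with real-time alerts",
--                 "priority": "medium",
--             }]
--         head, rest = fs[0], fs[1:]
--         tail = go(budget - 1, rest)
--         category = _classify(head)
--         return tail if category is None else [_make_step(category, head)] + tail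
--
--     return go(3, findings)
-- ===== Notes on version B (the rewrite author's own statement) =====
-- stated objective: alternative
-- what changed: Replaces A's iterative append-accumulator loop over findings[:3] plus two list slices by a recursive back-to-front construction: a budget-counted recursion whose base case is the monitoring step, consing each classified finding's step in front; classification is split from step construction, and the [:5] truncation disappears because the result provably has at most 4 entries.
import Mathlib
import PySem

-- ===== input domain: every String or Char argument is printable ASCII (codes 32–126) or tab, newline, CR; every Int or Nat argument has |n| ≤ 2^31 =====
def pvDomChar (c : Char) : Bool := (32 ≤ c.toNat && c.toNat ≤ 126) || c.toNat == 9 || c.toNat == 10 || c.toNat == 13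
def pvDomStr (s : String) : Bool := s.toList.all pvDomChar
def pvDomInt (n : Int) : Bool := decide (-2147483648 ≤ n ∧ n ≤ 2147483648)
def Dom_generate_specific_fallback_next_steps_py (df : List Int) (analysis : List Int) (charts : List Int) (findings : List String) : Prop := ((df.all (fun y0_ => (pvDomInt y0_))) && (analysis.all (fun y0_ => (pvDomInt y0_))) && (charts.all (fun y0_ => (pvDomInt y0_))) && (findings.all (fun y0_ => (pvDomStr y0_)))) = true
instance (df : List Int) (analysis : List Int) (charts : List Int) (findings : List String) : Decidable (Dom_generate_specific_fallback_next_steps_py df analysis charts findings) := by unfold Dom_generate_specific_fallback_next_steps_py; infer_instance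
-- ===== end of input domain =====

-- B replaces A's iterative append-loop over findings[:3] plus slices by a budget-counted recursion
-- that builds the list back-to-front (monitoring step as base case, cons in front); objective: alternative decomposition.

-- ===== PORT A =====
-- literal transliteration of A: a loop over findings[:3] appending one dict per matched branch,
-- then the monitoring dict, then steps[:5]; f-strings ported as PySem.Str.join "" [...].
def generate_specific_fallback_next_steps_py (df : List Int) (analysis : List Int) (charts : List Int) (findings : List String) : List (List (String × String)) :=
  let steps : List (List (String × String)) :=
    (PySem.List.slice findings none (some 3)).foldl (fun steps finding =>
      if PySem.Str.isIn "missing data" (PySem.Str.lower finding) then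
        steps ++ [[("action", PySem.Str.join "" ["Address data quality issues - ", finding, ". Implement data validation rules."]),
                   ("timeline", "Within 1 week"),
                   ("owner", "Data Engineering Team"),
                   ("impact", "Improve analysis accuracy by reducing null values"),
                   ("priority", "high")]]
      else if PySem.Str.isIn "correlation" (PySem.Str.lower finding) then
        steps ++ [[("action", PySem.Str.join "" ["Investigate correlation finding: ", finding, ". Build predictive model if correlation is causal."]),
                   ("timeline", "Within 2 weeks"),
                   ("owner", "Analytics Team"),
                   ("impact", "Enable predictive analytics for business planning"),
                   ("priority", "medium")]]
      else if PySem.Str.isIn "dominated by" (PySem.Str.lower finding) || PySem.Str.isIn "%" finding then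
        steps ++ [[("action", PySem.Str.join "" ["Analyze concentration risk: ", finding, ". Develop diversification strategy."]),
                   ("timeline", "This month"),
                   ("owner", "Strategy Team"),
                   ("impact", "Reduce business risk through diversification"),
                   ("priority", "high")]]
      else steps) []
  let steps := steps ++ [[("action", PySem.Str.join "" ["Set up automated monitoring for ", PySem.Int.toStr (findings.length : Int), " key metrics identified in analysis"]),
                          ("timeline", "Within 1 week"),
                          ("owner", "BI Team"),
                          ("impact", "Enable proactive decision making with real-time alerts"),
                          ("priority", "medium")]]
  PySem.List.slice steps none (some 5)

-- ===== PORT B =====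
-- Source B's _classify: category of a finding, or none
def pvClassify (finding : String) : Option Nat :=
  let lowered := PySem.Str.lower finding
  if PySem.Str.isIn "missing data" lowered then some 0
  else if PySem.Str.isIn "correlation" lowered then some 1
  else if PySem.Str.isIn "dominated by" lowered || PySem.Str.isIn "%" finding then some 2
  else none

-- Source B's _make_step
def pvMakeStep (category : Nat) (finding : String) : List (String × String) :=
  if category = 0 then
    [("action", PySem.Str.join "" ["Address data quality issues - ", finding, ". Implement data validation rules."]),
     ("timeline", "Within 1 week"),
     ("owner", "Data Engineering Team"),
     ("impact", "Improve analysis accuracy by reducing null values"),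
     ("priority", "high")]
  else if category = 1 then
    [("action", PySem.Str.join "" ["Investigate correlation finding: ", finding, ". Build predictive model if correlation is causal."]),
     ("timeline", "Within 2 weeks"),
     ("owner", "Analytics Team"),
     ("impact", "Enable predictive analytics for business planning"),
     ("priority", "medium")]
  else
    [("action", PySem.Str.join "" ["Analyze concentration risk: ", finding, ". Develop diversification strategy."]),
     ("timeline", "This month"),
     ("owner", "Strategy Team"),
     ("impact", "Reduce business risk through diversification"),
     ("priority", "high")]

-- Source B's inner go: budget-counted recursion, base case = the monitoring step, cons in front
def pvGo (n : Int) (budget : Nat) (fs : List String) : List (List (String × String)) :=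
  match budget, fs with
  | 0, _ =>
      [[("action", PySem.Str.join "" ["Set up automated monitoring for ", PySem.Int.toStr n, " key metrics identified in analysis"]),
        ("timeline", "Within 1 week"),
        ("owner", "BI Team"),
        ("impact", "Enable proactive decision making with real-time alerts"),
        ("priority", "medium")]]
  | _ + 1, [] =>
      [[("action", PySem.Str.join "" ["Set up automated monitoring for ", PySem.Int.toStr n, " key metrics identified in analysis"]),
        ("timeline", "Within 1 week"),
        ("owner", "BI Team"),
        ("impact", "Enable proactive decision making with real-time alerts"),
        ("priority", "medium")]]
  | b + 1, head :: rest =>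
      let tail := pvGo n b rest
      match pvClassify head with
      | none => tail
      | some category => pvMakeStep category head :: tail

def generate_specific_fallback_next_steps_py_alt (df : List Int) (analysis : List Int) (charts : List Int) (findings : List String) : List (List (String × String)) :=
  pvGo (findings.length : Int) 3 findings

-- ===== PRECONDITION & SPEC =====
def Spec_generate_specific_fallback_next_steps_py (df : List Int) (analysis : List Int) (charts : List Int) (findings : List String) (out : List (List (String × String))) : Prop := out = generate_specific_fallback_next_steps_py_alt df analysis charts findings
instance (df : List Int) (analysis : List Int) (charts : List Int) (findings : List String) (out : List (List (String × String))) : Decidable (Spec_generate_specific_fallback_next_steps_py df analysis charts findings out) := by unfold Spec_generate_specific_fallback_next_steps_py; infer_instance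

-- ===== CLAIM =====
def Claim_equal_generate_specific_fallback_next_steps_py : Prop := ∀ (df : List Int) (analysis : List Int) (charts : List Int) (findings : List String), Dom_generate_specific_fallback_next_steps_py df analysis charts findings → Spec_generate_specific_fallback_next_steps_py df analysis charts findings (generate_specific_fallback_next_steps_py df analysis charts findings)

-- ===== LEMMAS AND PROOFS =====

-- the per-finding contribution, shared by both characterisations
def pvStepOf (f : String) : List (List (String × String)) :=
  match pvClassify f with
  | some c => [pvMakeStep c f]
  | none => []

-- A's branch chain produces exactly pvStepOf
theorem pv_branch_eq (f : String) :
    (if PySem.Str.isIn "missing data" (PySem.Str.lower f) then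
        [[("action", PySem.Str.join "" ["Address data quality issues - ", f, ". Implement data validation rules."]),
          ("timeline", "Within 1 week"),
          ("owner", "Data Engineering Team"),
          ("impact", "Improve analysis accuracy by reducing null values"),
          ("priority", "high")]]
      else if PySem.Str.isIn "correlation" (PySem.Str.lower f) then
        [[("action", PySem.Str.join "" ["Investigate correlation finding: ", f, ". Build predictive model if correlation is causal."]),
          ("timeline", "Within 2 weeks"),
          ("owner", "Analytics Team"),
          ("impact", "Enable predictive analytics for business planning"),
          ("priority", "medium")]]
      else if PySem.Str.isIn "dominated by" (PySem.Str.lower f) || PySem.Str.isIn "%" f then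
        [[("action", PySem.Str.join "" ["Analyze concentration risk: ", f, ". Develop diversification strategy."]),
          ("timeline", "This month"),
          ("owner", "Strategy Team"),
          ("impact", "Reduce business risk through diversification"),
          ("priority", "high")]]
      else ([] : List (List (String × String)))) = pvStepOf f := by
  unfold pvStepOf pvClassify
  split_ifs <;> simp_all [pvMakeStep]

-- B's recursion in terms of pvStepOf
theorem pvGo_eq (n : Int) : ∀ (fs : List String) (b : Nat),
    pvGo n b fs = (fs.take b).flatMap pvStepOf ++ pvGo n 0 [] := by
  intro fs
  induction fs with
  | nil => intro b; cases b <;> simp [pvGo]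
  | cons head rest ih =>
      intro b
      cases b with
      | zero => simp [pvGo]
      | succ b =>
          simp only [pvGo, List.take_succ_cons, List.flatMap_cons, pvStepOf]
          cases pvClassify head <;> simp [pvGo, ih b]

-- each finding contributes at most one step
theorem pvStepOf_len_le (f : String) : (pvStepOf f).length ≤ 1 := by
  unfold pvStepOf; cases pvClassify f <;> simp

theorem pv_flatMap_len (l : List String) : (l.flatMap pvStepOf).length ≤ l.length := by
  induction l with
  | nil => simp
  | cons f rest ih =>
      have := pvStepOf_len_le f
      simp only [List.flatMap_cons, List.length_append, List.length_cons]
      omega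

theorem generate_specific_fallback_next_steps_py_eq (df analysis charts : List Int) (findings : List String) :
    generate_specific_fallback_next_steps_py df analysis charts findings =
    generate_specific_fallback_next_steps_py_alt df analysis charts findings := by
  unfold generate_specific_fallback_next_steps_py generate_specific_fallback_next_steps_py_alt
  have h3 : PySem.List.slice findings none (some 3) = findings.take 3 :=
    PySem.List.slice_to_natCast (b := 3) (xs := findings)
  have hstep : (fun (steps : List (List (String × String))) (finding : String) =>
      if PySem.Str.isIn "missing data" (PySem.Str.lower finding) then
        steps ++ [[("action", PySem.Str.join "" ["Address data quality issues - ", finding, ". Implement data validation rules."]),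
                   ("timeline", "Within 1 week"),
                   ("owner", "Data Engineering Team"),
                   ("impact", "Improve analysis accuracy by reducing null values"),
                   ("priority", "high")]]
      else if PySem.Str.isIn "correlation" (PySem.Str.lower finding) then
        steps ++ [[("action", PySem.Str.join "" ["Investigate correlation finding: ", finding, ". Build predictive model if correlation is causal."]),
                   ("timeline", "Within 2 weeks"),
                   ("owner", "Analytics Team"),
                   ("impact", "Enable predictive analytics for business planning"),
                   ("priority", "medium")]]
      else if PySem.Str.isIn "dominated by" (PySem.Str.lower finding) || PySem.Str.isIn "%" finding then
        steps ++ [[("action", PySem.Str.join "" ["Analyze concentration risk: ", finding, ". Develop diversification strategy."]),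
                   ("timeline", "This month"),
                   ("owner", "Strategy Team"),
                   ("impact", "Reduce business risk through diversification"),
                   ("priority", "high")]]
      else steps) =
      (fun (steps : List (List (String × String))) (f : String) => steps ++ pvStepOf f) := by
    funext steps f
    rw [← pv_branch_eq f]
    split_ifs <;> simp
  rw [h3, hstep, PySem.List.foldl_append_eq_flatMap]
  rw [pvGo_eq]
  have hlen : ((findings.take 3).flatMap pvStepOf).length ≤ 3 := by
    have h1 := pv_flatMap_len (findings.take 3)
    have h2 : (findings.take 3).length ≤ 3 := by simp
    omega
  have h5 : PySem.List.slice
      (List.nil ++ (findings.take 3).flatMap pvStepOf ++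
        [[("action", PySem.Str.join "" ["Set up automated monitoring for ", PySem.Int.toStr (findings.length : Int), " key metrics identified in analysis"]),
          ("timeline", "Within 1 week"),
          ("owner", "BI Team"),
          ("impact", "Enable proactive decision making with real-time alerts"),
          ("priority", "medium")]]) none (some 5) =
      (List.nil ++ (findings.take 3).flatMap pvStepOf ++
        [[("action", PySem.Str.join "" ["Set up automated monitoring for ", PySem.Int.toStr (findings.length : Int), " key metrics identified in analysis"]),
          ("timeline", "Within 1 week"),
          ("owner", "BI Team"),
          ("impact", "Enable proactive decision making with real-time alerts"),
          ("priority", "medium")]]) := by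
    rw [PySem.List.slice_to _ (by norm_num)]
    apply List.take_of_length_le
    simp only [List.nil_append, List.length_append, List.length_cons, List.length_nil]
    omega
  simp only [List.nil_append] at h5 ⊢
  rw [h5]
  simp [pvGo]

-- ===== VERDICT =====
theorem generate_specific_fallback_next_steps_py_spec : Claim_equal_generate_specific_fallback_next_steps_py := by
  intro df analysis charts findings _
  unfold Spec_generate_specific_fallback_next_steps_py
  exact generate_specific_fallback_next_steps_py_eq df analysis charts findings
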